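-- pv_equiv track=rewrite | github.com/awexa-web/CSEC_CPD | sereja and dima.py | game_score
-- ===== SOURCE A (Python) =====
-- def game_score(n, cards):
--     left, right = 0, n - 1
--     sereja_points, dima_points = 0, 0
--     turn = 0
--     while left <= right:
--         if cards[left] > cards[right]:
--             chosen_card = cards[left]
--             left += 1
--         else:
--             chosen_card = cards[right]
--             right -= 1
--
--         if turn == 0:
--             sereja_points += chosen_card
--         else:
--             dima_points += chosen_card
--         turn = 1 - turn
--     return sereja_points, dima_points
-- ===== SOURCE B (Python) =====
-- def game_score(n, cards):
--     left, right = 0, n - 1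
--     picks = []
--     while left <= right:
--         if cards[left] > cards[right]:
--             picks.append(cards[left])
--             left += 1
--         else:
--             picks.append(cards[right])
--             right -= 1
--     return sum(picks[0::2]), sum(picks[1::2])
-- ===== Notes on version B (the rewrite author's own statement) =====
-- stated objective: alternative
-- what changed: Replaces the interleaved turn-toggle accumulation with building the selection sequence once and summing its even/odd parity slices after the loop.
import Mathlib
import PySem

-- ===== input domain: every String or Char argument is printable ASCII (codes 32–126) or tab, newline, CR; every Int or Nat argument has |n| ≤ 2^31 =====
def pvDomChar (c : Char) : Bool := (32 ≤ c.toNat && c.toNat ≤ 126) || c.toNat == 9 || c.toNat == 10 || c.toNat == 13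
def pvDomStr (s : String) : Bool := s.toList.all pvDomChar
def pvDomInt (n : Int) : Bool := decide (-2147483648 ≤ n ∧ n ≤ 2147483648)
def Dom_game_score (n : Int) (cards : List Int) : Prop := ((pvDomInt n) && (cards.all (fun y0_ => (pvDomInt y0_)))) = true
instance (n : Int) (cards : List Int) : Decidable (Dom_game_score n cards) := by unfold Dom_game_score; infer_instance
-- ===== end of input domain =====

-- B builds the selection sequence once and sums its even/odd parity slices after
-- the loop, instead of A's interleaved turn-toggle accumulation (alternative decomposition).


-- ===== PORT A =====
-- A's while-loop, ported as structural recursion on fuel = (right - left + 1).toNat,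
-- which decreases by exactly 1 each iteration, so fuel = 0 iff the guard left <= right fails.
-- IndexError (pyGet? = none) is excluded by Pre_; the port returns the current accumulators there.
def gameLoopA (cards : List Int) : Nat → Int → Int → Int → Int → Int → Int × Int
  | 0, _, _, s, d, _ => (s, d)
  | fuel + 1, left, right, s, d, turn =>
    match PySem.List.pyGet? cards left, PySem.List.pyGet? cards right with
    | some cl, some cr =>
      if cl > cr then
        if turn == 0 then gameLoopA cards fuel (left + 1) right (s + cl) d (1 - turn)
        else gameLoopA cards fuel (left + 1) right s (d + cl) (1 - turn)
      else
        if turn == 0 then gameLoopA cards fuel left (right - 1) (s + cr) d (1 - turn)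
        else gameLoopA cards fuel left (right - 1) s (d + cr) (1 - turn)
    | _, _ => (s, d)

def game_score (n : Int) (cards : List Int) : Int × Int :=
  gameLoopA cards (n - 1 - 0 + 1).toNat 0 (n - 1) 0 0 0

-- ===== PORT B =====
-- Source B's selection loop (same fuel convention), appending each chosen card to picks.
def selLoopB (cards : List Int) : Nat → Int → Int → List Int → List Int
  | 0, _, _, picks => picks
  | fuel + 1, left, right, picks =>
    match PySem.List.pyGet? cards left, PySem.List.pyGet? cards right with
    | some cl, some cr =>
      if cl > cr then selLoopB cards fuel (left + 1) right (picks ++ [cl])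
      else selLoopB cards fuel left (right - 1) (picks ++ [cr])
    | _, _ => picks

-- picks[0::2] for a list (exact: step-2 slice from 0 of a Python list).
def stride2 : List Int → List Int
  | [] => []
  | [a] => [a]
  | a :: _ :: rest => a :: stride2 rest

def game_score_alt (n : Int) (cards : List Int) : Int × Int :=
  let picks := selLoopB cards (n - 1 - 0 + 1).toNat 0 (n - 1) []
  ((stride2 picks).sum, (stride2 (picks.drop 1)).sum)   -- sum picks[0::2], sum picks[1::2]

-- ===== PRECONDITION & SPEC =====
-- Pre_ excludes n > len(cards), on which Python A raises IndexError.
def Pre_game_score (n : Int) (cards : List Int) : Prop := n ≤ (cards.length : Int)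
instance (n : Int) (cards : List Int) : Decidable (Pre_game_score n cards) := by
  unfold Pre_game_score; infer_instance
def pvWitness_game_score : Int × List Int := (3, [1, 2, 3])

def Spec_game_score (n : Int) (cards : List Int) (out : Int × Int) : Prop := out = game_score_alt n cards
instance (n : Int) (cards : List Int) (out : Int × Int) : Decidable (Spec_game_score n cards out) := by unfold Spec_game_score; infer_instance

-- ===== CLAIM (what is proved, stated in full; the proofs are below) =====
def Claim_equal_game_score : Prop := ∀ (n : Int) (cards : List Int), Dom_game_score n cards → Pre_game_score n cards → Spec_game_score n cards (game_score n cards)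

-- ===== LEMMAS AND PROOFS =====
theorem stride2_cons (c : Int) (xs : List Int) :
    stride2 (c :: xs) = c :: stride2 (xs.drop 1) := by
  cases xs <;> rfl

theorem selLoopB_acc (cards : List Int) (fuel : Nat) :
    ∀ (l r : Int) (picks : List Int),
    selLoopB cards fuel l r picks = picks ++ selLoopB cards fuel l r [] := by
  induction fuel with
  | zero => intro l r picks; simp [selLoopB]
  | succ fuel ih =>
    intro l r picks
    rw [selLoopB, selLoopB]
    cases hL : PySem.List.pyGet? cards l with
    | none => simp
    | some cl =>
      cases hR : PySem.List.pyGet? cards r with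
      | none => simp
      | some cr =>
        simp only
        by_cases hc : cl > cr
        · simp only [hc, if_true]
          rw [ih (l + 1) r (picks ++ [cl]), ih (l + 1) r ([] ++ [cl])]
          simp
        · simp only [hc, if_false]
          rw [ih l (r - 1) (picks ++ [cr]), ih l (r - 1) ([] ++ [cr])]
          simp

-- main invariant: the interleaved accumulation equals the parity-slice sums of the picks
theorem loop_eq (cards : List Int) (fuel : Nat) :
    ∀ (l r s d : Int),
    gameLoopA cards fuel l r s d 0
      = (s + (stride2 (selLoopB cards fuel l r [])).sum,
         d + (stride2 ((selLoopB cards fuel l r []).drop 1)).sum)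
    ∧ gameLoopA cards fuel l r s d 1
      = (s + (stride2 ((selLoopB cards fuel l r []).drop 1)).sum,
         d + (stride2 (selLoopB cards fuel l r [])).sum) := by
  induction fuel with
  | zero => intro l r s d; simp [gameLoopA, selLoopB, stride2]
  | succ fuel ih =>
    intro l r s d
    rw [gameLoopA, gameLoopA, selLoopB]
    cases hL : PySem.List.pyGet? cards l with
    | none => simp [stride2]
    | some cl =>
      cases hR : PySem.List.pyGet? cards r with
      | none => simp [stride2]
      | some cr =>
        simp only
        by_cases hc : cl > cr
        · simp only [hc, if_true]
          rw [selLoopB_acc cards fuel (l + 1) r ([] ++ [cl])]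
          norm_num
          rw [(ih (l + 1) r (s + cl) d).2, (ih (l + 1) r s (d + cl)).1]
          simp [stride2_cons, Prod.ext_iff]
          constructor <;> ring
        · simp only [hc, if_false]
          rw [selLoopB_acc cards fuel l (r - 1) ([] ++ [cr])]
          norm_num
          rw [(ih l (r - 1) (s + cr) d).2, (ih l (r - 1) s (d + cr)).1]
          simp [stride2_cons, Prod.ext_iff]
          constructor <;> ring

-- ===== VERDICT (by name: the statement is the Claim_ definition above) =====
theorem game_score_spec : Claim_equal_game_score := by
  intro n cards _ _
  unfold Spec_game_score game_score game_score_alt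
  have h := (loop_eq cards (n - 1 - 0 + 1).toNat 0 (n - 1) 0 0).1
  simp only [zero_add] at h
  exact h
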